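-- pv_equiv track=rewrite | github.com/WaiHein-REISys/AI-Migration-Tool | wizard/detector.py | _detect_component_patterns
-- ===== SOURCE A (Python) =====
-- def _detect_component_patterns(files: list[str]) -> list[str]:
--     patterns = []
--     if any(f.endswith(".component.ts") for f in files):
--         patterns.append("Angular @Component decorator (*.component.ts)")
--     if any(f.endswith(".tsx") for f in files):
--         patterns.append("React functional components (*.tsx)")
--     if any("module.css" in f for f in files):
--         patterns.append("CSS Modules (*.module.css)")
--     if any(f.endswith(".module.ts") for f in files):
--         patterns.append("Angular NgModule (*.module.ts)")
--     if any(f.endswith("index.ts") for f in files):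
--         patterns.append("Barrel index.ts exports")
--     return patterns
-- ===== SOURCE B (Python) =====
-- def _detect_component_patterns(files: list[str]) -> list[str]:
--     has_component_ts = has_tsx = has_module_css = has_module_ts = has_index_ts = False
--     for f in files:
--         if f.endswith(".component.ts"):
--             has_component_ts = True
--         if f.endswith(".tsx"):
--             has_tsx = True
--         if "module.css" in f:
--             has_module_css = True
--         if f.endswith(".module.ts"):
--             has_module_ts = True
--         if f.endswith("index.ts"):
--             has_index_ts = True
--     patterns = []
--     if has_component_ts:
--         patterns.append("Angular @Component decorator (*.component.ts)")
--     if has_tsx: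
--         patterns.append("React functional components (*.tsx)")
--     if has_module_css:
--         patterns.append("CSS Modules (*.module.css)")
--     if has_module_ts:
--         patterns.append("Angular NgModule (*.module.ts)")
--     if has_index_ts:
--         patterns.append("Barrel index.ts exports")
--     return patterns
-- ===== Notes on version B (the rewrite author's own statement) =====
-- stated objective: alternative
-- what changed: Replaces five independent early-exit any() scans of the file list with one single pass that accumulates five boolean flags and emits the labels from the flags afterwards.
import Mathlib
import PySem

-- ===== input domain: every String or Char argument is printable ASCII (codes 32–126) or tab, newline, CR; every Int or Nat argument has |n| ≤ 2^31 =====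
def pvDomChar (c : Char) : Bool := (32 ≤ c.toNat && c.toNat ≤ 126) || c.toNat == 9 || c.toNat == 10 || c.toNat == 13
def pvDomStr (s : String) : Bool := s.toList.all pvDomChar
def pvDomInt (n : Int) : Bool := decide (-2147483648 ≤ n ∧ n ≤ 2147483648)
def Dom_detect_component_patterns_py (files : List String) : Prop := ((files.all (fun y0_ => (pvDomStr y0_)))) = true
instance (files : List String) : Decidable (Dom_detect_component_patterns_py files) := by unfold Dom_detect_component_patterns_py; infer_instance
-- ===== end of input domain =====

-- B makes one pass over files accumulating five boolean flags instead of A's five independent any-scans; same return value (objective: alternative decomposition).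


-- ===== PORT A =====
def detect_component_patterns_py (files : List String) : List String :=
  let patterns : List String := []
  let patterns := if files.any (fun f => PySem.Str.endswith f ".component.ts")
    then patterns ++ ["Angular @Component decorator (*.component.ts)"] else patterns
  let patterns := if files.any (fun f => PySem.Str.endswith f ".tsx")
    then patterns ++ ["React functional components (*.tsx)"] else patterns
  let patterns := if files.any (fun f => PySem.Str.isIn "module.css" f)
    then patterns ++ ["CSS Modules (*.module.css)"] else patterns
  let patterns := if files.any (fun f => PySem.Str.endswith f ".module.ts")
    then patterns ++ ["Angular NgModule (*.module.ts)"] else patterns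
  let patterns := if files.any (fun f => PySem.Str.endswith f "index.ts")
    then patterns ++ ["Barrel index.ts exports"] else patterns
  patterns

-- ===== PORT B =====
-- the loop body of Source B: update the five flags for one file f
def pvStepB (st : Bool × Bool × Bool × Bool × Bool) (f : String) :
    Bool × Bool × Bool × Bool × Bool :=
  let st := if PySem.Str.endswith f ".component.ts" then (true, st.2) else st
  let st := if PySem.Str.endswith f ".tsx" then (st.1, true, st.2.2) else st
  let st := if PySem.Str.isIn "module.css" f then (st.1, st.2.1, true, st.2.2.2) else st
  let st := if PySem.Str.endswith f ".module.ts" then (st.1, st.2.1, st.2.2.1, true, st.2.2.2.2) else st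
  let st := if PySem.Str.endswith f "index.ts" then (st.1, st.2.1, st.2.2.1, st.2.2.2.1, true) else st
  st

-- one pass over files, then emit the labels from the flags
def detect_component_patterns_py_alt (files : List String) : List String :=
  let flags := files.foldl pvStepB (false, false, false, false, false)
  let patterns : List String := []
  let patterns := if flags.1 then patterns ++ ["Angular @Component decorator (*.component.ts)"] else patterns
  let patterns := if flags.2.1 then patterns ++ ["React functional components (*.tsx)"] else patterns
  let patterns := if flags.2.2.1 then patterns ++ ["CSS Modules (*.module.css)"] else patterns
  let patterns := if flags.2.2.2.1 then patterns ++ ["Angular NgModule (*.module.ts)"] else patterns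
  let patterns := if flags.2.2.2.2 then patterns ++ ["Barrel index.ts exports"] else patterns
  patterns

-- ===== PRECONDITION & SPEC =====
def Spec_detect_component_patterns_py (files : List String) (out : List String) : Prop := out = detect_component_patterns_py_alt files
instance (files : List String) (out : List String) : Decidable (Spec_detect_component_patterns_py files out) := by unfold Spec_detect_component_patterns_py; infer_instance

-- ===== CLAIM (what is proved, stated in full; the proofs are below) =====
def Claim_equal_detect_component_patterns_py : Prop := ∀ (files : List String), Dom_detect_component_patterns_py files → Spec_detect_component_patterns_py files (detect_component_patterns_py files)

-- ===== LEMMAS AND PROOFS =====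

-- each flag update is an 'or' with its predicate
theorem pvStepB_eq (a b c d e : Bool) (f : String) :
    pvStepB (a, b, c, d, e) f
    = (a || PySem.Str.endswith f ".component.ts",
       b || PySem.Str.endswith f ".tsx",
       c || PySem.Str.isIn "module.css" f,
       d || PySem.Str.endswith f ".module.ts",
       e || PySem.Str.endswith f "index.ts") := by
  unfold pvStepB
  cases PySem.Str.endswith f ".component.ts" <;>
  cases PySem.Str.endswith f ".tsx" <;>
  cases PySem.Str.isIn "module.css" f <;>
  cases PySem.Str.endswith f ".module.ts" <;>
  cases PySem.Str.endswith f "index.ts" <;> simp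

-- the fold's five flags are exactly the five any-scans
theorem pv_flags_eq (files : List String) (a b c d e : Bool) :
    files.foldl pvStepB (a, b, c, d, e)
    = (a || files.any (fun f => PySem.Str.endswith f ".component.ts"),
       b || files.any (fun f => PySem.Str.endswith f ".tsx"),
       c || files.any (fun f => PySem.Str.isIn "module.css" f),
       d || files.any (fun f => PySem.Str.endswith f ".module.ts"),
       e || files.any (fun f => PySem.Str.endswith f "index.ts")) := by
  induction files generalizing a b c d e with
  | nil => simp
  | cons f fs ih =>
    rw [List.foldl_cons, pvStepB_eq, ih]
    simp [Bool.or_assoc]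

-- ===== VERDICT (by name: the statement is the Claim_ definition above) =====
theorem detect_component_patterns_py_spec : Claim_equal_detect_component_patterns_py := by
  intro files _
  show _ = _
  unfold detect_component_patterns_py detect_component_patterns_py_alt
  rw [pv_flags_eq]
  simp only [Bool.false_or]
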